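-- pv_equiv track=rewrite | github.com/AaravGKamat/CSE331 | HW0/HW0Python/Solution.py | column_create
-- ===== SOURCE A (Python) =====
-- def column_create(ones, rows):
--     result = []
--     for i in range(0, rows):
--         if (ones > 0):
--             result.append(1)
--         else:
--             result.append(0)
--         ones = ones-1
--     return result
-- ===== SOURCE B (Python) =====
-- def column_create(ones, rows):
--     k = max(0, min(ones, rows))
--     return [1] * k + [0] * (rows - k)
-- ===== Notes on version B (the rewrite author's own statement) =====
-- stated objective: simpler
-- what changed: Replaces the per-row loop with a decrementing counter by a closed-form clamp k = max(0, min(ones, rows)) and direct list replication [1]*k + [0]*(rows-k).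
import Mathlib
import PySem

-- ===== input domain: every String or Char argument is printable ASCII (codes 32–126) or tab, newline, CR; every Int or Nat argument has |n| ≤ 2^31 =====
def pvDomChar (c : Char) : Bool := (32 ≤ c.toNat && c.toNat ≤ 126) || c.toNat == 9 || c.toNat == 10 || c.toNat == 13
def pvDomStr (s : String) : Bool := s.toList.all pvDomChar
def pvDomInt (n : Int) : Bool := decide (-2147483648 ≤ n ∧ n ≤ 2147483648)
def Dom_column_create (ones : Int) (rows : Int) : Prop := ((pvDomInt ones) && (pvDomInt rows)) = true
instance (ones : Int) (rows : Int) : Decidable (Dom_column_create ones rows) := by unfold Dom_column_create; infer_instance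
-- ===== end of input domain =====

-- B replaces A's per-row loop (append 1 while a decrementing counter is positive) by a
-- closed-form clamp k = max 0 (min ones rows) and list replication; objective: simpler.

-- ===== PORT A =====
-- loop state: (ones, result); the loop variable i is unused by the body
def column_create (ones : Int) (rows : Int) : List Int :=
  ((PySem.List.pyRange 0 rows 1).foldl
    (fun (s : Int × List Int) _ =>
      (s.1 - 1, s.2 ++ [if s.1 > 0 then (1 : Int) else 0]))
    (ones, [])).2

-- ===== PORT B =====
def column_create_alt (ones : Int) (rows : Int) : List Int :=
  let k := max 0 (min ones rows)
  List.replicate k.toNat 1 ++ List.replicate (rows - k).toNat 0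

-- ===== PRECONDITION & SPEC =====
def Spec_column_create (ones : Int) (rows : Int) (out : List Int) : Prop := out = column_create_alt ones rows
instance (ones : Int) (rows : Int) (out : List Int) : Decidable (Spec_column_create ones rows out) := by unfold Spec_column_create; infer_instance

-- ===== CLAIM (what is proved, stated in full; the proofs are below) =====
def Claim_equal_column_create : Prop := ∀ (ones : Int) (rows : Int), Dom_column_create ones rows → Spec_column_create ones rows (column_create ones rows)

-- ===== LEMMAS AND PROOFS =====

-- the loop of A, written as structural recursion on the number of remaining iterations
def pvGo (o : Int) : Nat → List Int
  | 0 => []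
  | n + 1 => (if o > 0 then (1 : Int) else 0) :: pvGo (o - 1) n

-- A's foldl over any index list of length n equals the accumulator followed by pvGo
theorem pvFoldl_eq_go (l : List Int) : ∀ (o : Int) (acc : List Int),
    (l.foldl (fun (s : Int × List Int) _ =>
        (s.1 - 1, s.2 ++ [if s.1 > 0 then (1 : Int) else 0])) (o, acc)).2
      = acc ++ pvGo o l.length := by
  induction l with
  | nil => intro o acc; simp [pvGo]
  | cons x xs ih =>
      intro o acc
      simp only [List.foldl_cons, List.length_cons, pvGo, ih]
      simp

theorem pvGo_eq_replicate (n : Nat) : ∀ (o : Int),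
    pvGo o n = List.replicate (max 0 (min o (n : Int))).toNat 1
               ++ List.replicate ((n : Int) - max 0 (min o (n : Int))).toNat 0 := by
  induction n with
  | zero => intro o; simp [pvGo]
  | succ n ih =>
      intro o
      by_cases h : o > 0
      · have hk : (max 0 (min o ((n : Int) + 1))).toNat
            = (max 0 (min (o - 1) (n : Int))).toNat + 1 := by omega
        have hz : (((n : Int) + 1) - max 0 (min o ((n : Int) + 1))).toNat
            = ((n : Int) - max 0 (min (o - 1) (n : Int))).toNat := by omega
        simp only [pvGo, if_pos h, ih (o - 1)]
        push_cast
        rw [hk, hz, List.replicate_succ]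
        simp
      · have hk : (max 0 (min o ((n : Int) + 1))).toNat = 0 := by omega
        have hk' : (max 0 (min (o - 1) (n : Int))).toNat = 0 := by omega
        have hz : (((n : Int) + 1) - max 0 (min o ((n : Int) + 1))).toNat
            = ((n : Int) - max 0 (min (o - 1) (n : Int))).toNat + 1 := by omega
        simp only [pvGo, if_neg h, ih (o - 1)]
        push_cast
        rw [hk, hk', hz, List.replicate_succ]
        simp

-- ===== VERDICT (by name: the statement is the Claim_ definition above) =====
theorem column_create_spec : Claim_equal_column_create := by
  intro ones rows _
  unfold Spec_column_create column_create column_create_alt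
  rw [pvFoldl_eq_go, PySem.List.length_pyRange_one, pvGo_eq_replicate]
  rcases le_or_gt rows 0 with h | h
  · have h1 : ((rows - 0).toNat : Int) = 0 := by omega
    have e1 : (max 0 (min ones (0:Int))).toNat = 0 := by omega
    have e2 : (max 0 (min ones rows)).toNat = 0 := by omega
    have e3 : ((0:Int) - max 0 (min ones 0)).toNat = 0 := by omega
    have e4 : (rows - max 0 (min ones rows)).toNat = 0 := by omega
    simp only [h1, e1, e2, e3, e4]
    simp
  · have h1 : (((rows - 0).toNat : Nat) : Int) = rows := by omega
    simp only [h1]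
    simp
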